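-- pv_equiv track=rewrite | github.com/b-nard-perso/book-capture | src/book_capture/extraction.py | analyser_tranche
-- ===== SOURCE A (Python) =====
-- def analyser_tranche(texte: str) -> dict:
--     """Analyse le texte brut d'une tranche pour en extraire titre et auteur.
--
--     Heuristiques appliquées :
--     1. On découpe le texte en lignes non vides.
--     2. La ligne la plus longue (en nombre de caractères) est considérée comme
--        le titre.
--     3. S'il existe au moins deux lignes, la deuxième plus longue est
--        considérée comme l'auteur.
--     4. Les lignes restantes sont ignorées (logo éditeur, etc.).
--
--     Parameters
--     ----------
--     texte:
--         Texte brut issu de l'OCR pour une tranche de livre.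
--
--     Returns
--     -------
--     dict
--         Dictionnaire avec les clés ``'titre'`` et ``'auteur'`` (chaînes,
--         éventuellement vides).
--     """
--     lignes = [ligne.strip() for ligne in texte.splitlines() if ligne.strip()]
--
--     if not lignes:
--         return {"titre": "", "auteur": ""}
--
--     # Trier par longueur décroissante pour trouver la ligne la plus informative
--     lignes_triees = sorted(lignes, key=len, reverse=True)
--
--     titre = lignes_triees[0] if lignes_triees else ""
--     auteur = lignes_triees[1] if len(lignes_triees) > 1 else ""
--
--     return {"titre": titre, "auteur": auteur}
-- ===== SOURCE B (Python) =====
-- def analyser_tranche(texte: str) -> dict: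
--     """Single pass tracking the two longest non-empty stripped lines (no sort)."""
--     titre = ""
--     auteur = ""
--     for ligne in texte.splitlines():
--         l = ligne.strip()
--         if not l:
--             continue
--         if len(l) > len(titre):
--             auteur = titre
--             titre = l
--         elif len(l) > len(auteur):
--             auteur = l
--     return {"titre": titre, "auteur": auteur}
-- ===== Notes on version B (the rewrite author's own statement) =====
-- stated objective: simpler
-- what changed: Replaces the sort-then-index-top-two (with a separate empty-input early return) by a single pass that tracks the two longest lines with strict > comparisons, which reproduces the stable sort's first-occurrence tie-breaking and needs no empty-list special case.
import Mathlib
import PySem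

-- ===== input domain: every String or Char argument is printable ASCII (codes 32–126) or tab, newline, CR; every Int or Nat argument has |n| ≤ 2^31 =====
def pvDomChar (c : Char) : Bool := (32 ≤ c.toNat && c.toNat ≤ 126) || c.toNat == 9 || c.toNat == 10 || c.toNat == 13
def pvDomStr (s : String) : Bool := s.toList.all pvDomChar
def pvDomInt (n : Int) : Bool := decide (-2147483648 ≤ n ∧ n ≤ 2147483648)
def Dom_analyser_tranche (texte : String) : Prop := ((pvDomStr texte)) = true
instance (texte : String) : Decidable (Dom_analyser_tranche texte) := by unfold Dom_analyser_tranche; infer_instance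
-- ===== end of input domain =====

-- B replaces A's sort-then-take-top-two (and its empty-input early return) by one pass
-- tracking the two longest lines with strict comparisons; objective: simpler.

-- ===== PORT A =====
def analyser_tranche (texte : String) : List (String × String) :=
  let lignes := ((PySem.Str.splitlines texte).map PySem.Str.strip).filter (fun l => decide (l ≠ ""))
  if lignes = [] then [("titre", ""), ("auteur", "")]
  else
    let lignes_triees := PySem.List.sorted lignes PySem.Str.len true
    let titre := if lignes_triees ≠ [] then lignes_triees.getD 0 "" else ""
    let auteur := if 1 < lignes_triees.length then lignes_triees.getD 1 "" else ""
    [("titre", titre), ("auteur", auteur)]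

-- ===== PORT B =====
def analyser_tranche_alt (texte : String) : List (String × String) :=
  let p := (PySem.Str.splitlines texte).foldl (fun (ta : String × String) ligne =>
      let l := PySem.Str.strip ligne
      if l = "" then ta
      else if PySem.Str.len ta.1 < PySem.Str.len l then (l, ta.1)
      else if PySem.Str.len ta.2 < PySem.Str.len l then (ta.1, l)
      else ta) ("", "")
  [("titre", p.1), ("auteur", p.2)]

-- ===== PRECONDITION & SPEC =====
def Spec_analyser_tranche (texte : String) (out : List (String × String)) : Prop := out = analyser_tranche_alt texte
instance (texte : String) (out : List (String × String)) : Decidable (Spec_analyser_tranche texte out) := by unfold Spec_analyser_tranche; infer_instance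

-- ===== CLAIM (what is proved, stated in full; the proofs are below) =====
def Claim_equal_analyser_tranche : Prop := ∀ (texte : String), Dom_analyser_tranche texte → Spec_analyser_tranche texte (analyser_tranche texte)

-- ===== LEMMAS AND PROOFS =====

-- B's loop body on an already-stripped non-empty line
def pvStep (ta : String × String) (l : String) : String × String :=
  if PySem.Str.len ta.1 < PySem.Str.len l then (l, ta.1)
  else if PySem.Str.len ta.2 < PySem.Str.len l then (ta.1, l)
  else ta

-- one insertion of A's stable reverse insertion sort
def pvIns (acc : List String) (x : String) : List String :=
  PySem.List.insertBy (fun a b => decide (PySem.Str.len b < PySem.Str.len a)) x acc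

-- the first two elements, padded with ""
def pvTwo (s : List String) : String × String := (s.getD 0 "", s.getD 1 "")

theorem pv_len_pos (x : String) (h : x ≠ "") : 0 < PySem.Str.len x := by
  rw [PySem.Str.len_eq]
  have hn : x.toList ≠ [] := by
    intro hn
    apply h
    have := congrArg String.ofList hn
    simpa using this
  have := List.length_pos_iff.mpr hn
  omega

theorem pvTwo_ins (x : String) (hx : x ≠ "") (s : List String) :
    pvTwo (pvIns s x) = pvStep (pvTwo s) x := by
  have hx0 : 0 < x.length := by
    have := pv_len_pos x hx
    rw [PySem.Str.len_eq] at this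
    simpa using this
  match s with
  | [] =>
    simp [pvIns, pvTwo, pvStep, PySem.List.insertBy, hx0]
  | [y1] =>
    by_cases c1 : y1.length < x.length <;>
      simp [pvIns, pvTwo, pvStep, PySem.List.insertBy, hx0, c1]
  | y1 :: y2 :: r =>
    by_cases c1 : y1.length < x.length <;>
      by_cases c2 : y2.length < x.length <;>
        simp [pvIns, pvTwo, pvStep, PySem.List.insertBy, c1, c2]

theorem pv_fold (ls : List String) :
    ∀ acc, (∀ x ∈ ls, x ≠ "") →
      ls.foldl pvStep (pvTwo acc) = pvTwo (ls.foldl pvIns acc) := by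
  induction ls with
  | nil => intro acc _; rfl
  | cons x t ih =>
    intro acc h
    have hx : x ≠ "" := h x (by simp)
    have ht : ∀ y ∈ t, y ≠ "" := fun y hy => h y (by simp [hy])
    simp only [List.foldl_cons]
    rw [← pvTwo_ins x hx acc]
    exact ih (pvIns acc x) ht

theorem pv_skip (xs : List String) :
    ∀ init : String × String,
      xs.foldl (fun ta ligne =>
        let l := PySem.Str.strip ligne
        if l = "" then ta
        else if PySem.Str.len ta.1 < PySem.Str.len l then (l, ta.1)
        else if PySem.Str.len ta.2 < PySem.Str.len l then (ta.1, l)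
        else ta) init
      = ((xs.map PySem.Str.strip).filter (fun l => decide (l ≠ ""))).foldl pvStep init := by
  induction xs with
  | nil => intro init; rfl
  | cons x t ih =>
    intro init
    by_cases hx : PySem.Str.strip x = ""
    · simpa [hx] using ih init
    · have := ih (pvStep init (PySem.Str.strip x))
      simpa [hx, pvStep] using this

theorem pv_sorted_eq (ls : List String) :
    PySem.List.sorted ls PySem.Str.len true = ls.foldl pvIns [] := by
  rw [PySem.List.sorted_rev_eq_foldl_insertBy]
  rfl

-- ===== VERDICT (by name: the statement is the Claim_ definition above) =====
theorem analyser_tranche_spec : Claim_equal_analyser_tranche := by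
  intro texte _
  unfold Spec_analyser_tranche analyser_tranche analyser_tranche_alt
  simp only [pv_skip]
  set lignes := ((PySem.Str.splitlines texte).map PySem.Str.strip).filter (fun l => decide (l ≠ "")) with hl
  have hne : ∀ x ∈ lignes, x ≠ "" := by
    intro x hx
    rw [hl] at hx
    have := (List.mem_filter.mp hx).2
    simpa using this
  have hfold : lignes.foldl pvStep ("", "") = pvTwo (lignes.foldl pvIns []) := by
    have : pvTwo ([] : List String) = ("", "") := rfl
    rw [← this]
    exact pv_fold lignes [] hne
  by_cases hnil : lignes = []
  · simp [hnil]
  · have htri : PySem.List.sorted lignes PySem.Str.len true ≠ [] := by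
      rw [Ne, PySem.List.sorted_eq_nil_iff]; exact hnil
    rw [hfold, ← pv_sorted_eq]
    set tri := PySem.List.sorted lignes PySem.Str.len true with htr
    simp only [hnil, htri, ite_not]
    by_cases hlen : 1 < tri.length
    · simp [pvTwo, hlen]
    · simp [pvTwo, hlen]
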